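-- pv_equiv track=rewrite | github.com/shubhamkumar28031999/Python_proctice | data_structures/array/subarray_maximum.py | genrate_all_substring
-- ===== SOURCE A (Python) =====
-- from itertools import permutations
--
-- def genrate_all_substring(s):
--     lt= lambda pair: pair[0]<pair[1]
--     index_pairs=filter(lt,permutations(range(len(s)+1),2))
--     dp=dict()
--     for i,j in index_pairs:
--         if max(s[i:j]) not in dp:
--                 dp[max(s[i:j])]=len(s[i:j])
--         else:
--                 dp[max(s[i:j])]+=len(s[i:j])
--     return dp
-- ===== SOURCE B (Python) =====
-- def genrate_all_substring(s):
--     dp = {}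
--     n = len(s)
--     for i in range(n):
--         m = s[i]
--         for j in range(i, n):
--             if m < s[j]:
--                 m = s[j]
--             dp[m] = dp.get(m, 0) + (j - i + 1)
--     return dp
-- ===== Notes on version B (the rewrite author's own statement) =====
-- stated objective: faster
-- what changed: Instead of enumerating all index pairs via filtered permutations and recomputing max(s[i:j]) by a fresh slice scan for every pair, B keeps a running maximum per start index while extending the end index, updating the dict in the same (i,j) order.
import Mathlib
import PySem

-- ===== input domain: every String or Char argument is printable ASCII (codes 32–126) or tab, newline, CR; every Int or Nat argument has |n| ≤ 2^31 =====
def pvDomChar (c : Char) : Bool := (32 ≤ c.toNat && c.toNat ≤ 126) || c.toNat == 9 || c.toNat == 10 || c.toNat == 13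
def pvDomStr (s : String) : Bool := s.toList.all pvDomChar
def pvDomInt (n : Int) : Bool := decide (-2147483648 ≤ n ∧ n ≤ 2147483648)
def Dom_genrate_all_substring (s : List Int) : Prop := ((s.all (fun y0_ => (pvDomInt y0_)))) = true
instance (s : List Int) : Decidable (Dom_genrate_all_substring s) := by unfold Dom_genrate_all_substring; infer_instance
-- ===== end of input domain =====

-- B replaces A's O(n^3) scheme (all filtered index pairs, each slice scanned afresh for its max)
-- by an O(n^2) running maximum per start index, in the same iteration order.

-- ===== PORT A =====
-- lt = lambda pair: pair[0] < pair[1]   (permutations(_, 2) yields length-2 tuples)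
def pvPairLt (p : List Int) : Bool :=
  match p with
  | [i, j] => decide (i < j)
  | _ => false

-- one iteration of A's loop body for a pair (i, j)
def pvStepA (s : List Int) (dp : PySem.Dict Int Int) (p : List Int) : PySem.Dict Int Int :=
  match p with
  | [i, j] =>
    match PySem.List.max? (PySem.List.slice s (some i) (some j)) (fun y => y) with
    | some m =>
        if dp.contains m then
          dp.modify m 0 (· + ((PySem.List.slice s (some i) (some j)).length : Int))
        else
          dp.insert m ((PySem.List.slice s (some i) (some j)).length : Int)
    | none => dp   -- unreachable: the filter keeps i < j, so s[i:j] is nonempty and max never raises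
  | _ => dp        -- unreachable: permutations(_, 2) yields pairs

def genrate_all_substring (s : List Int) : List (Int × Int) :=
  let index_pairs := (PySem.List.permutations (PySem.List.pyRange 0 ((s.length : Int) + 1)) 2).filter pvPairLt
  (index_pairs.foldl (pvStepA s) PySem.Dict.empty).items

-- ===== PORT B =====
-- one iteration of B's inner loop: j is the current END position, md.1 the running maximum of s[i..j-1]
def pvStepB (s : List Int) (i : Int) (md : Int × PySem.Dict Int Int) (j : Int) : Int × PySem.Dict Int Int :=
  let x := PySem.List.pyGetD s j 0          -- s[j]; j is always in range here
  let m := if md.1 < x then x else md.1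
  (m, md.2.insert m (md.2.getD m 0 + (j - i + 1)))

def genrate_all_substring_alt (s : List Int) : List (Int × Int) :=
  let n : Int := s.length
  ((PySem.List.pyRange 0 n).foldl
      (fun dp i => ((PySem.List.pyRange i n).foldl (pvStepB s i) (PySem.List.pyGetD s i 0, dp)).2)
      PySem.Dict.empty).items

-- ===== PRECONDITION & SPEC =====
def Spec_genrate_all_substring (s : List Int) (out : List (Int × Int)) : Prop := out = genrate_all_substring_alt s
instance (s : List Int) (out : List (Int × Int)) : Decidable (Spec_genrate_all_substring s out) := by unfold Spec_genrate_all_substring; infer_instance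

-- ===== CLAIM (what is proved, stated in full; the proofs are below) =====
def Claim_equal_genrate_all_substring : Prop := ∀ (s : List Int), Dom_genrate_all_substring s → Spec_genrate_all_substring s (genrate_all_substring s)

-- ===== LEMMAS AND PROOFS =====

-- the common normal form both programs are reduced to
def pvUpd (dp : PySem.Dict Int Int) (k L : Int) : PySem.Dict Int Int := dp.insert k (dp.getD k 0 + L)

def pvKey (s : List Int) (i j : Nat) : Int :=
  (PySem.List.max? (List.take (j - i) (List.drop i s)) (fun y => y)).getD 0

def pvCanonBody (s : List Int) (dp : PySem.Dict Int Int) (i : Nat) : PySem.Dict Int Int :=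
  (List.range' (i+1) (s.length - i)).foldl
    (fun dp j => pvUpd dp (pvKey s i j) ((j - i : Nat) : Int)) dp

def pvCanon (s : List Int) : PySem.Dict Int Int :=
  (List.range s.length).foldl (pvCanonBody s) PySem.Dict.empty

-- unfolding permutations once (structural recursion on r)
theorem pvPermSucc {α : Type} (xs : List α) (r : Nat) :
    PySem.List.permutations xs (r+1) =
      (List.range xs.length).flatMap (fun i =>
        match xs[i]? with
        | none => []
        | some x => (PySem.List.permutations (xs.eraseIdx i) r).map (x :: ·)) := rfl

theorem pvFlatMapRangeGet {α β : Type} (xs : List α) (g : α → List β) :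
    (List.range xs.length).flatMap (fun i =>
        match xs[i]? with
        | none => ([] : List β)
        | some x => g x) = xs.flatMap g := by
  induction xs with
  | nil => simp
  | cons x xs ih =>
      simp only [List.length_cons, List.range_succ_eq_map, List.flatMap_cons, List.flatMap_map,
        Nat.succ_eq_add_one, List.getElem?_cons_zero, List.getElem?_cons_succ]
      rw [ih]

theorem pvPermOne {α : Type} (xs : List α) :
    PySem.List.permutations xs 1 = xs.map (fun x => [x]) := by
  rw [pvPermSucc]
  simp only [PySem.List.permutations_zero, List.map_cons, List.map_nil]
  rw [pvFlatMapRangeGet xs (fun x => [[x]])]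
  exact (List.map_eq_flatMap).symm

-- pyRange over two Nat casts
theorem pvPyRangeNat (a b : Nat) :
    PySem.List.pyRange (a : Int) (b : Int) = List.map (fun k : Nat => (k : Int)) (List.range' a (b - a)) := by
  induction hk : b - a generalizing a with
  | zero => rw [PySem.List.pyRange_one_eq_nil (by exact_mod_cast (by omega : b ≤ a))]; rfl
  | succ n ih =>
      rw [PySem.List.pyRange_one_cons (show (a : Int) < (b : Int) by exact_mod_cast (by omega : a < b))]
      rw [List.range'_succ, List.map_cons]
      congr 1
      rw [show ((a : Int) + 1) = ((a + 1 : Nat) : Int) from by push_cast; ring]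
      exact ih (a + 1) (by omega)

-- Python max of l ++ [x] in terms of max of l (first-extremal rule)
theorem pvMaxAppend (l : List Int) (x : Int) :
    PySem.List.max? (l ++ [x]) (fun y => y) =
      some (match PySem.List.max? l (fun y => y) with
            | none => x
            | some m => if m < x then x else m) := by
  have hmax : ∀ m y : Int, max m y = if m < y then y else m := by
    intro m y; rw [max_def]; split_ifs <;> omega
  cases l with
  | nil => rfl
  | cons a t =>
      rw [List.cons_append, PySem.List.max?_id_cons, PySem.List.max?_id_cons, List.foldl_append]
      simp only [List.foldl_cons, List.foldl_nil]
      rw [hmax]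

-- the slice grows one element at the right end
theorem pvSliceSucc (s : List Int) (i p : Nat) (hip : i ≤ p) (hp : p < s.length) :
    List.take (p + 1 - i) (List.drop i s) = List.take (p - i) (List.drop i s) ++ [s.getD p 0] := by
  have h1 : p + 1 - i = (p - i) + 1 := by omega
  rw [h1, List.take_add_one]
  have h2 : (List.drop i s)[p - i]? = s[p]? := by
    rw [List.getElem?_drop]; congr 1; omega
  have h3 : s[p]? = some (s.getD p 0) := by
    rw [List.getElem?_eq_getElem hp, List.getD_eq_getElem _ _ hp]
  rw [h2, h3]
  rfl

-- A's loop body on an admissible pair is the canonical update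
theorem pvStepA_eq (s : List Int) (dp : PySem.Dict Int Int) (i j : Nat)
    (hij : i < j) (hj : j ≤ s.length) :
    pvStepA s dp [(i : Int), (j : Int)] = pvUpd dp (pvKey s i j) ((j - i : Nat) : Int) := by
  have hsl : PySem.List.slice s (some (i:Int)) (some (j:Int)) = List.take (j-i) (List.drop i s) :=
    PySem.List.slice_natCast s i j
  have hlen : (List.take (j-i) (List.drop i s)).length = j - i := by
    simp only [List.length_take, List.length_drop]; omega
  have hne : List.take (j-i) (List.drop i s) ≠ [] := by
    intro h; have := congrArg List.length h; rw [hlen] at this; simp at this; omega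
  obtain ⟨m, hm⟩ : ∃ m, PySem.List.max? (List.take (j-i) (List.drop i s)) (fun y => y) = some m := by
    cases h : PySem.List.max? (List.take (j-i) (List.drop i s)) (fun y => y) with
    | none => exact absurd ((PySem.List.max?_eq_none_iff _ _).mp h) hne
    | some m => exact ⟨m, rfl⟩
  have hkey : pvKey s i j = m := by simp [pvKey, hm]
  simp only [pvStepA, hsl, hm, hlen, hkey]
  by_cases hc : dp.contains m
  · simp [hc, PySem.Dict.modify, pvUpd]
  · have hc' : dp.contains m = false := by simpa using hc
    simp [hc', pvUpd, PySem.Dict.getD_of_not_contains dp 0 hc']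

-- A reduces to the canonical double fold
theorem pvA_eq_canon (s : List Int) : genrate_all_substring s = (pvCanon s).items := by
  have hN : ((s.length : Int) + 1) = ((s.length + 1 : Nat) : Int) := by push_cast; ring
  simp only [genrate_all_substring]
  refine congrArg PySem.Dict.items ?_
  rw [hN, PySem.List.pyRange_zero_natCast, pvPermSucc, List.filter_flatMap, List.foldl_flatMap]
  simp only [List.length_map, List.length_range]
  have hext : (List.range (s.length+1)).foldl (pvCanonBody s) PySem.Dict.empty = pvCanon s := by
    rw [List.range_succ, List.foldl_append, List.foldl_cons, List.foldl_nil]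
    simp [pvCanonBody, pvCanon]
  rw [← hext]
  apply PySem.List.foldl_congr_mem
  intro acc i hi
  rw [List.mem_range] at hi
  simp only [List.getElem?_map, List.getElem?_range, hi, Option.map_some]
  rw [pvPermOne, List.map_map, List.filter_map]
  rw [List.eraseIdx_eq_take_drop_succ, ← List.map_take, ← List.map_drop]
  rw [List.take_range, Nat.min_eq_left (by omega)]
  simp only [List.range_eq_range']
  rw [List.drop_range']
  have ha : 0 + (i + 1) * 1 = i + 1 := by omega
  have hb : (s.length + 1) - (i + 1) = s.length - i := by omega
  rw [ha, hb]
  rw [List.filter_append]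
  simp only [Function.comp_def, pvPairLt]
  have h1 : List.filter (fun y => decide ((i : Int) < y)) ((List.range' 0 i).map (fun k : Nat => (k : Int))) = [] := by
    rw [List.filter_eq_nil_iff]
    intro y hy
    simp only [List.mem_map, List.mem_range'_1] at hy
    obtain ⟨k, hk, rfl⟩ := hy
    simp only [decide_eq_true_eq]
    omega
  have h2 : List.filter (fun y => decide ((i : Int) < y)) ((List.range' (i + 1) (s.length - i)).map (fun k : Nat => (k : Int))) = (List.range' (i + 1) (s.length - i)).map (fun k : Nat => (k : Int)) := by
    rw [List.filter_eq_self]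
    intro y hy
    simp only [List.mem_map, List.mem_range'_1] at hy
    obtain ⟨k, hk, rfl⟩ := hy
    simp only [decide_eq_true_eq]
    omega
  rw [h1, h2, List.nil_append]
  rw [List.map_map, List.foldl_map]
  unfold pvCanonBody
  apply PySem.List.foldl_congr_mem
  intro dp j hj
  rw [List.mem_range'_1] at hj
  exact pvStepA_eq s dp i j (by omega) (by omega)

-- running maximum value before processing end-position p (the default covers the first step, p = i)
def pvMval (s : List Int) (i p : Nat) : Int :=
  (PySem.List.max? (List.take (p - i) (List.drop i s)) (fun y => y)).getD (s.getD i 0)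

-- B's inner loop equals the canonical inner fold
theorem pvInnerB (s : List Int) (i : Nat) :
    ∀ (k p : Nat), i ≤ p → p + k ≤ s.length →
    ∀ (dp : PySem.Dict Int Int),
      ((List.range' p k).foldl (fun md (q : Nat) => pvStepB s (i : Int) md (q : Int)) (pvMval s i p, dp)).2 =
      (List.range' (p+1) k).foldl (fun dp j => pvUpd dp (pvKey s i j) ((j - i : Nat) : Int)) dp := by
  intro k
  induction k with
  | zero => intro p _ _ dp; rfl
  | succ k ih =>
      intro p hip hpk dp
      have hp : p < s.length := by omega
      rw [List.range'_succ, List.range'_succ, List.foldl_cons, List.foldl_cons]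
      have hx : PySem.List.pyGetD s (p : Int) 0 = s.getD p 0 := PySem.List.pyGetD_natCast s p 0
      have hm' : (if pvMval s i p < s.getD p 0 then s.getD p 0 else pvMval s i p) = pvMval s i (p+1) := by
        unfold pvMval
        rw [pvSliceSucc s i p hip hp, pvMaxAppend]
        cases h : PySem.List.max? (List.take (p - i) (List.drop i s)) (fun y => y) with
        | none =>
            have htake := (PySem.List.max?_eq_none_iff _ _).mp h
            rcases List.take_eq_nil_iff.mp htake with h0 | h0
            · have hpi : p = i := by omega
              subst hpi
              simp
            · exfalso
              have := congrArg List.length h0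
              simp at this
              omega
        | some m => simp
      have hkey : pvKey s i (p+1) = pvMval s i (p+1) := by
        unfold pvKey pvMval
        rw [pvSliceSucc s i p hip hp, pvMaxAppend]
        simp
      have harith : ((p : Int) - (i : Int) + 1) = ((p + 1 - i : Nat) : Int) := by omega
      have hstep : pvStepB s (i : Int) (pvMval s i p, dp) (p : Int)
          = (pvMval s i (p+1), pvUpd dp (pvKey s i (p+1)) ((p + 1 - i : Nat) : Int)) := by
        simp only [pvStepB, hx, pvUpd, hkey]
        rw [hm', harith]
      rw [hstep, ih (p+1) (by omega) (by omega)]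

theorem pvB_eq_canon (s : List Int) : genrate_all_substring_alt s = (pvCanon s).items := by
  simp only [genrate_all_substring_alt]
  refine congrArg PySem.Dict.items ?_
  rw [PySem.List.pyRange_zero_natCast, List.foldl_map]
  unfold pvCanon
  apply PySem.List.foldl_congr_mem
  intro acc i hi
  rw [List.mem_range] at hi
  rw [pvPyRangeNat i s.length, List.foldl_map]
  have hinit : PySem.List.pyGetD s (i : Int) 0 = pvMval s i i := by
    rw [PySem.List.pyGetD_natCast]
    simp [pvMval, PySem.List.max?]
  rw [hinit]
  have h := pvInnerB s i (s.length - i) i le_rfl (by omega) acc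
  unfold pvCanonBody
  exact h

-- ===== VERDICT (by name: the statement is the Claim_ definition above) =====
theorem genrate_all_substring_spec : Claim_equal_genrate_all_substring := by
  intro s _
  unfold Spec_genrate_all_substring
  rw [pvA_eq_canon, pvB_eq_canon]
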